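-- pv_equiv track=rewrite | github.com/PrasannaKuchipudi/PLACEMENT_CODES | countpairswithevensum1.py | even_pairs
-- ===== SOURCE A (Python) =====
-- def even_pairs(arr):
--     even=0
--     odd=0
--     for num in arr:
--         if num%2==0:
--             even+=1
--         else:
--             odd+=1
--     even_pairs=(even*(even-1))//2
--     odd_pairs=(odd*(odd-1))//2
--     return even_pairs + odd_pairs
-- ===== SOURCE B (Python) =====
-- def even_pairs(arr):
--     if not arr:
--         return 0
--     x, rest = arr[0], arr[1:]
--     same = 0
--     for y in rest:
--         if y % 2 == x % 2:
--             same += 1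
--     return same + even_pairs(rest)
-- ===== Notes on version B (the rewrite author's own statement) =====
-- stated objective: alternative
-- what changed: B counts same-parity pairs directly by structural recursion (head compared against the rest, then recurse), instead of A's single counting pass followed by the closed-form combination n*(n-1)//2 on each parity class.
import Mathlib
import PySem

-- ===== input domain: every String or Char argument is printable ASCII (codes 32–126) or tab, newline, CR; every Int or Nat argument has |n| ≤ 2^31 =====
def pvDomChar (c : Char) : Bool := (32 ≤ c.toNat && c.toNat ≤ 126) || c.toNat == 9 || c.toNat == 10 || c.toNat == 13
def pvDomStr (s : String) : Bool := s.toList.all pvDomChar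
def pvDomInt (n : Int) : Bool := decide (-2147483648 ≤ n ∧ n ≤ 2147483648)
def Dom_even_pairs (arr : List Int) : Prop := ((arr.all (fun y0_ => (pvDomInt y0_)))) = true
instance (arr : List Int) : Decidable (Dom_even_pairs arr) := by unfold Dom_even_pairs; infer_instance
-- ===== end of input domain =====

-- B counts same-parity pairs directly by structural recursion instead of A's
-- parity-count-plus-closed-form; 'alternative' objective, return values proved equal.

-- ===== PORT A =====
-- A: one pass counting even/odd elements, then (e*(e-1))//2 + (o*(o-1))//2
def even_pairs (arr : List Int) : Int :=
  let p := arr.foldl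
    (fun (p : Int × Int) num =>
      if PySem.Int.mod num 2 = 0 then (p.1 + 1, p.2) else (p.1, p.2 + 1))
    (0, 0)
  PySem.Int.floordiv (p.1 * (p.1 - 1)) 2 + PySem.Int.floordiv (p.2 * (p.2 - 1)) 2

-- ===== PORT B =====
-- B: compare the head's parity against every later element, then recurse on the tail
def even_pairs_alt : List Int → Int
  | [] => 0
  | x :: rest =>
    (rest.foldl (fun c y => if PySem.Int.mod y 2 = PySem.Int.mod x 2 then c + 1 else c) 0)
      + even_pairs_alt rest

-- ===== PRECONDITION & SPEC =====
def Spec_even_pairs (arr : List Int) (out : Int) : Prop := out = even_pairs_alt arr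
instance (arr : List Int) (out : Int) : Decidable (Spec_even_pairs arr out) := by unfold Spec_even_pairs; infer_instance

-- ===== CLAIM (what is proved, stated in full; the proofs are below) =====
def Claim_equal_even_pairs : Prop := ∀ (arr : List Int), Dom_even_pairs arr → Spec_even_pairs arr (even_pairs arr)

-- ===== LEMMAS AND PROOFS =====

-- number of even / odd elements, as Int
def cE : List Int → Int
  | [] => 0
  | y :: ys => (if PySem.Int.mod y 2 = 0 then 1 else 0) + cE ys

def cO : List Int → Int
  | [] => 0
  | y :: ys => (if PySem.Int.mod y 2 = 0 then 0 else 1) + cO ys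

theorem foldA (xs : List Int) : ∀ (a b : Int),
    xs.foldl (fun (p : Int × Int) num =>
      if PySem.Int.mod num 2 = 0 then (p.1 + 1, p.2) else (p.1, p.2 + 1)) (a, b)
      = (a + cE xs, b + cO xs) := by
  induction xs with
  | nil => intro a b; rw [List.foldl_nil, cE, cO]; simp only [Prod.mk.injEq]; constructor <;> ring
  | cons x xs ih =>
    intro a b
    rcases PySem.Int.mod_two_eq x with hx | hx
    · have hE : cE (x :: xs) = 1 + cE xs := by rw [cE, hx, if_pos rfl]
      have hO : cO (x :: xs) = cO xs := by rw [cO, hx, if_pos rfl]; ring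
      simp only [List.foldl_cons, hx, hE, hO]
      rw [if_pos trivial, ih]
      simp only [Prod.mk.injEq]; constructor <;> first | ring | trivial
    · have hE : cE (x :: xs) = cE xs := by rw [cE, hx, if_neg (by norm_num : ¬((1:Int) = 0))]; ring
      have hO : cO (x :: xs) = 1 + cO xs := by rw [cO, hx, if_neg (by norm_num : ¬((1:Int) = 0))]
      simp only [List.foldl_cons, hx, hE, hO]
      rw [if_neg (by norm_num : ¬((1:Int) = 0)), ih]
      simp only [Prod.mk.injEq]; constructor <;> first | ring | trivial

theorem innerCount (x : Int) (xs : List Int) : ∀ (c : Int),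
    xs.foldl (fun c y => if PySem.Int.mod y 2 = PySem.Int.mod x 2 then c + 1 else c) c
      = c + (if PySem.Int.mod x 2 = 0 then cE xs else cO xs) := by
  induction xs with
  | nil =>
    intro c
    rcases PySem.Int.mod_two_eq x with hx | hx
    · rw [List.foldl_nil, hx, if_pos rfl, cE]; ring
    · rw [List.foldl_nil, hx, if_neg (by norm_num : ¬((1:Int) = 0)), cO]; ring
  | cons y ys ih =>
    intro c
    rcases PySem.Int.mod_two_eq x with hx | hx <;>
      simp only [hx] at ih ⊢ <;>
      rcases PySem.Int.mod_two_eq y with hy | hy <;>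
      simp only [List.foldl_cons, cE, cO, hy] <;>
      simp only [ih] <;> norm_num <;> try ring

theorem fdiv_step (e : Int) :
    PySem.Int.floordiv ((e + 1) * e) 2 = PySem.Int.floordiv (e * (e - 1)) 2 + e := by
  obtain ⟨k, hk⟩ := Int.even_mul_succ_self (e - 1)
  have h2 : e * (e - 1) = 2 * k := by linear_combination hk
  have h3 : (e + 1) * e = 2 * (k + e) := by linear_combination hk
  rw [PySem.Int.floordiv_eq_ediv_of_pos (by norm_num : (0:Int) < 2),
      PySem.Int.floordiv_eq_ediv_of_pos (by norm_num : (0:Int) < 2), h2, h3,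
      Int.mul_ediv_cancel_left _ two_ne_zero, Int.mul_ediv_cancel_left _ two_ne_zero]

theorem alt_closed (xs : List Int) :
    even_pairs_alt xs
      = PySem.Int.floordiv (cE xs * (cE xs - 1)) 2
        + PySem.Int.floordiv (cO xs * (cO xs - 1)) 2 := by
  induction xs with
  | nil => rw [even_pairs_alt, cE, cO]; norm_num [PySem.Int.floordiv]
  | cons x xs ih =>
    rw [even_pairs_alt, innerCount, ih]
    rcases PySem.Int.mod_two_eq x with hx | hx
    · have hE : cE (x :: xs) = 1 + cE xs := by rw [cE, hx, if_pos rfl]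
      have hO : cO (x :: xs) = cO xs := by rw [cO, hx, if_pos rfl]; ring
      rw [hx, if_pos rfl, hE, hO,
          (by ring : (1 + cE xs) * (1 + cE xs - 1) = (cE xs + 1) * cE xs), fdiv_step]
      ring
    · have hE : cE (x :: xs) = cE xs := by
        rw [cE, hx, if_neg (by norm_num : ¬((1:Int) = 0))]; ring
      have hO : cO (x :: xs) = 1 + cO xs := by
        rw [cO, hx, if_neg (by norm_num : ¬((1:Int) = 0))]
      rw [hx, if_neg (by norm_num : ¬((1:Int) = 0)), hE, hO,
          (by ring : (1 + cO xs) * (1 + cO xs - 1) = (cO xs + 1) * cO xs), fdiv_step]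
      ring

-- ===== VERDICT (by name: the statement is the Claim_ definition above) =====
theorem even_pairs_spec : Claim_equal_even_pairs := by
  intro arr _
  unfold Spec_even_pairs even_pairs
  simp only [foldA, zero_add, alt_closed]
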